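-- pv_equiv track=rewrite | github.com/fjnnng/wfwp | wfwp/fnc.py | getcat
-- ===== SOURCE A (Python) =====
-- def getcat(usages):
--     # categories are selected from https://commons.wikimedia.org/wiki/Commons:Featured_pictures
--     cat = 0
--     for usage in usages:
--         usage = usage.lower()
--         if not usage.startswith("commons:featured pictures"):
--             continue
--         if "/arthropod" in usage:
--             cat |= 1 << 0
--         elif "/bird" in usage:
--             cat |= 1 << 1
--         elif "/people" in usage:
--             cat |= 1 << 2
--         elif "/amphibian" in usage:
--             cat |= 1 << 3
--         elif "/fish" in usage:
--             cat |= 1 << 4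
--         elif "/reptile" in usage:
--             cat |= 1 << 5
--         elif usage.endswith("animals"):
--             cat |= 1 << 6
--         elif "/bone" in usage:
--             cat |= 1 << 7
--         elif "/shell" in usage:
--             cat |= 1 << 8
--         elif "/plant" in usage:
--             cat |= 1 << 9
--         elif "/fungi" in usage:
--             cat |= 1 << 10
--         elif usage.endswith("lifeforms"):
--             cat |= 1 << 11
--         elif "/rock" in usage:
--             cat |= 1 << 12
--         elif "/cemeter" in usage:
--             cat |= 1 << 13
--         elif "/religio" in usage:
--             cat |= 1 << 14
--         elif "/computer" in usage:
--             cat |= 1 << 15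
--     return cat
-- ===== SOURCE B (Python) =====
-- # Rule-major classification: instead of scanning rules per usage, iterate the
-- # rules once in priority order over the surviving gated usages; a usage that
-- # matches a rule is eliminated so only its first (highest-priority) match counts.
-- RULES = [
--     ("in", "/arthropod"), ("in", "/bird"), ("in", "/people"),
--     ("in", "/amphibian"), ("in", "/fish"), ("in", "/reptile"),
--     ("ends", "animals"), ("in", "/bone"), ("in", "/shell"),
--     ("in", "/plant"), ("in", "/fungi"), ("ends", "lifeforms"),
--     ("in", "/rock"), ("in", "/cemeter"), ("in", "/religio"),
--     ("in", "/computer"),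
-- ]
--
--
-- def _matches(kind, text, u):
--     return (text in u) if kind == "in" else u.endswith(text)
--
--
-- def getcat(usages):
--     remaining = [u for u in (s.lower() for s in usages)
--                  if u.startswith("commons:featured pictures")]
--     cat = 0
--     for bit, (kind, text) in enumerate(RULES):
--         if any(_matches(kind, text, u) for u in remaining):
--             cat |= 1 << bit
--             remaining = [u for u in remaining if not _matches(kind, text, u)]
--     return cat
-- ===== Notes on version B (the rewrite author's own statement) =====
-- stated objective: alternative
-- what changed: Inverts the loop nesting: instead of classifying each usage by an if/elif cascade, B first filters the gated lowercased usages once, then iterates the 16 rules in priority order, setting a rule's bit if any surviving usage matches it and eliminating all usages matching that rule so only each usage's highest-priority match counts.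
import Mathlib
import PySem

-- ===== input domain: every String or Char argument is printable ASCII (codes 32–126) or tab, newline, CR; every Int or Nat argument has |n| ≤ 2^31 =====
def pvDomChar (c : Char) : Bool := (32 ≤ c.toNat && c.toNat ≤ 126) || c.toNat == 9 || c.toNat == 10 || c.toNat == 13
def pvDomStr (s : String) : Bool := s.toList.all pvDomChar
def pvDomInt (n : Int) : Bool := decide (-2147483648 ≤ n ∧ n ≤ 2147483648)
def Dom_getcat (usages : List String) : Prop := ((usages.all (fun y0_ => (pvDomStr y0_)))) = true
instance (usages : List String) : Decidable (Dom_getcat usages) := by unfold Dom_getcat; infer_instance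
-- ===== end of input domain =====

-- B inverts the loop nesting (rule-major with elimination of matched usages) instead of A's
-- per-usage if/elif cascade (objective: alternative decomposition; same cost).

-- ===== PORT A =====
-- one iteration of A's loop body (the if/elif chain)
def getcatStepA (cat : Int) (usage : String) : Int :=
  let u := PySem.Str.lower usage
  if !(PySem.Str.startswith u "commons:featured pictures") then cat
  else if PySem.Str.isIn "/arthropod" u then PySem.Int.bor cat ((1 : Int) <<< 0)
  else if PySem.Str.isIn "/bird" u then PySem.Int.bor cat ((1 : Int) <<< 1)
  else if PySem.Str.isIn "/people" u then PySem.Int.bor cat ((1 : Int) <<< 2)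
  else if PySem.Str.isIn "/amphibian" u then PySem.Int.bor cat ((1 : Int) <<< 3)
  else if PySem.Str.isIn "/fish" u then PySem.Int.bor cat ((1 : Int) <<< 4)
  else if PySem.Str.isIn "/reptile" u then PySem.Int.bor cat ((1 : Int) <<< 5)
  else if PySem.Str.endswith u "animals" then PySem.Int.bor cat ((1 : Int) <<< 6)
  else if PySem.Str.isIn "/bone" u then PySem.Int.bor cat ((1 : Int) <<< 7)
  else if PySem.Str.isIn "/shell" u then PySem.Int.bor cat ((1 : Int) <<< 8)
  else if PySem.Str.isIn "/plant" u then PySem.Int.bor cat ((1 : Int) <<< 9)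
  else if PySem.Str.isIn "/fungi" u then PySem.Int.bor cat ((1 : Int) <<< 10)
  else if PySem.Str.endswith u "lifeforms" then PySem.Int.bor cat ((1 : Int) <<< 11)
  else if PySem.Str.isIn "/rock" u then PySem.Int.bor cat ((1 : Int) <<< 12)
  else if PySem.Str.isIn "/cemeter" u then PySem.Int.bor cat ((1 : Int) <<< 13)
  else if PySem.Str.isIn "/religio" u then PySem.Int.bor cat ((1 : Int) <<< 14)
  else if PySem.Str.isIn "/computer" u then PySem.Int.bor cat ((1 : Int) <<< 15)
  else cat

def getcat (usages : List String) : Int :=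
  usages.foldl getcatStepA 0

-- ===== PORT B =====
-- Source B's RULES table: (predicate kind, text), bit = position
def pvRules : List (String × String) :=
  [("in", "/arthropod"), ("in", "/bird"), ("in", "/people"),
   ("in", "/amphibian"), ("in", "/fish"), ("in", "/reptile"),
   ("ends", "animals"), ("in", "/bone"), ("in", "/shell"),
   ("in", "/plant"), ("in", "/fungi"), ("ends", "lifeforms"),
   ("in", "/rock"), ("in", "/cemeter"), ("in", "/religio"),
   ("in", "/computer")]

-- Source B's _matches
def pvMatches (kind text u : String) : Bool :=
  if kind == "in" then PySem.Str.isIn text u else PySem.Str.endswith u text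

-- Source B's rule-major loop; enumerate's index is a nonneg Int, so .toNat for `1 << bit` is exact
def getcat_alt (usages : List String) : Int :=
  let remaining := (usages.map PySem.Str.lower).filter
      (fun u => PySem.Str.startswith u "commons:featured pictures")
  ((PySem.List.enumerate pvRules).foldl
    (fun (st : Int × List String) p =>
      if st.2.any (fun u => pvMatches p.2.1 p.2.2 u) then
        (PySem.Int.bor st.1 ((1 : Int) <<< p.1.toNat),
         st.2.filter (fun u => !pvMatches p.2.1 p.2.2 u))
      else st)
    (0, remaining)).1

-- ===== PRECONDITION & SPEC =====
def Spec_getcat (usages : List String) (out : Int) : Prop := out = getcat_alt usages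
instance (usages : List String) (out : Int) : Decidable (Spec_getcat usages out) := by unfold Spec_getcat; infer_instance

-- ===== CLAIM (what is proved, stated in full; the proofs are below) =====
def Claim_equal_getcat : Prop := ∀ (usages : List String), Dom_getcat usages → Spec_getcat usages (getcat usages)

-- ===== LEMMAS AND PROOFS =====

-- index of the first rule matching u (first-match priority), proof-layer helper
def pvFirst (u : String) : List (String × String) → Option Nat
  | [] => none
  | r :: rs => if pvMatches r.1 r.2 u then some 0 else (pvFirst u rs).map (· + 1)

-- the bit A's elif chain contributes for one (already lowercased) usage, as a Nat
def pvContribN (u : String) : Nat :=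
  if PySem.Str.startswith u "commons:featured pictures" then
    match pvFirst u pvRules with
    | some b => 1 <<< b
    | none => 0
  else 0

-- Nat shadow of B's rule-major fold
def pvFoldBN (k : Nat) (c : Nat) (rem : List String) : List (String × String) → Nat
  | [] => c
  | r :: rs =>
    if rem.any (fun u => pvMatches r.1 r.2 u) then
      pvFoldBN (k + 1) (c ||| 1 <<< k) (rem.filter (fun u => !pvMatches r.1 r.2 u)) rs
    else pvFoldBN (k + 1) c rem rs

lemma pvFirst_nil (u : String) : pvFirst u [] = none := rfl

lemma pvFirst_cons (k t u : String) (rs : List (String × String)) :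
    pvFirst u ((k, t) :: rs) = if pvMatches k t u then some 0 else (pvFirst u rs).map (· + 1) := rfl

lemma pvFirst_cons' (r : String × String) (u : String) (rs : List (String × String)) :
    pvFirst u (r :: rs) = if pvMatches r.1 r.2 u then some 0 else (pvFirst u rs).map (· + 1) := rfl

lemma pvMatches_in (t u : String) : pvMatches "in" t u = PySem.Str.isIn t u := rfl
lemma pvMatches_ends (t u : String) : pvMatches "ends" t u = PySem.Str.endswith u t := rfl

lemma bor_shift (c b : Nat) :
    PySem.Int.bor (Int.ofNat c) ((1 : Int) <<< b) = Int.ofNat (c ||| 1 <<< b) := by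
  have h : ((1 : Int) <<< b) = Int.ofNat (1 <<< b) := by
    simp [Int.shiftLeft_eq, Nat.shiftLeft_eq]
  rw [h]
  exact PySem.Int.bor_natCast c (1 <<< b)

set_option maxHeartbeats 2000000 in
lemma stepA_eq (c : Nat) (usage : String) :
    getcatStepA (Int.ofNat c) usage = Int.ofNat (c ||| pvContribN (PySem.Str.lower usage)) := by
  unfold getcatStepA pvContribN
  dsimp only
  cases hg : PySem.Str.startswith (PySem.Str.lower usage) "commons:featured pictures" with
  | false => simp only [Bool.not_false, if_true, Bool.false_eq_true, if_false, Nat.or_zero]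
  | true =>
    simp only [Bool.not_true, Bool.false_eq_true, if_false, if_true]
    rw [pvRules]
    rw [pvFirst_cons, pvFirst_cons, pvFirst_cons, pvFirst_cons, pvFirst_cons, pvFirst_cons, pvFirst_cons, pvFirst_cons, pvFirst_cons, pvFirst_cons, pvFirst_cons, pvFirst_cons, pvFirst_cons, pvFirst_cons, pvFirst_cons, pvFirst_cons, pvFirst_nil]
    rw [pvMatches_in "/arthropod", pvMatches_in "/bird", pvMatches_in "/people", pvMatches_in "/amphibian", pvMatches_in "/fish", pvMatches_in "/reptile", pvMatches_ends "animals", pvMatches_in "/bone", pvMatches_in "/shell", pvMatches_in "/plant", pvMatches_in "/fungi", pvMatches_ends "lifeforms", pvMatches_in "/rock", pvMatches_in "/cemeter", pvMatches_in "/religio", pvMatches_in "/computer"]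
    cases h0 : PySem.Str.isIn "/arthropod" (PySem.Str.lower usage) with
    | true => exact bor_shift c 0
    | false =>
      cases h1 : PySem.Str.isIn "/bird" (PySem.Str.lower usage) with
      | true => exact bor_shift c 1
      | false =>
        cases h2 : PySem.Str.isIn "/people" (PySem.Str.lower usage) with
        | true => exact bor_shift c 2
        | false =>
          cases h3 : PySem.Str.isIn "/amphibian" (PySem.Str.lower usage) with
          | true => exact bor_shift c 3
          | false =>
            cases h4 : PySem.Str.isIn "/fish" (PySem.Str.lower usage) with
            | true => exact bor_shift c 4
            | false =>
              cases h5 : PySem.Str.isIn "/reptile" (PySem.Str.lower usage) with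
              | true => exact bor_shift c 5
              | false =>
                cases h6 : PySem.Str.endswith (PySem.Str.lower usage) "animals" with
                | true => exact bor_shift c 6
                | false =>
                  cases h7 : PySem.Str.isIn "/bone" (PySem.Str.lower usage) with
                  | true => exact bor_shift c 7
                  | false =>
                    cases h8 : PySem.Str.isIn "/shell" (PySem.Str.lower usage) with
                    | true => exact bor_shift c 8
                    | false =>
                      cases h9 : PySem.Str.isIn "/plant" (PySem.Str.lower usage) with
                      | true => exact bor_shift c 9
                      | false =>
                        cases h10 : PySem.Str.isIn "/fungi" (PySem.Str.lower usage) with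
                        | true => exact bor_shift c 10
                        | false =>
                          cases h11 : PySem.Str.endswith (PySem.Str.lower usage) "lifeforms" with
                          | true => exact bor_shift c 11
                          | false =>
                            cases h12 : PySem.Str.isIn "/rock" (PySem.Str.lower usage) with
                            | true => exact bor_shift c 12
                            | false =>
                              cases h13 : PySem.Str.isIn "/cemeter" (PySem.Str.lower usage) with
                              | true => exact bor_shift c 13
                              | false =>
                                cases h14 : PySem.Str.isIn "/religio" (PySem.Str.lower usage) with
                                | true => exact bor_shift c 14
                                | false =>
                                  cases h15 : PySem.Str.isIn "/computer" (PySem.Str.lower usage) with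
                                  | true => exact bor_shift c 15
                                  | false =>
                                    exact congrArg Int.ofNat (Nat.or_zero c).symm

lemma foldA_eq (usages : List String) (c : Nat) :
    usages.foldl getcatStepA (Int.ofNat c) =
      Int.ofNat (usages.foldl (fun c u => c ||| pvContribN (PySem.Str.lower u)) c) := by
  induction usages generalizing c with
  | nil => rfl
  | cons h t ih => simp only [List.foldl_cons, stepA_eq, ih]

lemma testA (usages : List String) (c : Nat) (i : Nat) :
    (usages.foldl (fun c u => c ||| pvContribN (PySem.Str.lower u)) c).testBit i =
      (c.testBit i || usages.any (fun u => (pvContribN (PySem.Str.lower u)).testBit i)) := by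
  induction usages generalizing c with
  | nil => simp
  | cons h t ih =>
    simp [List.foldl_cons, ih, Nat.testBit_or, Bool.or_assoc]

lemma testBit_one_shift (b i : Nat) : (1 <<< b).testBit i = (b == i) := by
  rcases eq_or_ne b i with h | h
  · subst h; simp [Nat.shiftLeft_eq, Nat.testBit_two_pow_self]
  · simp [Nat.shiftLeft_eq, Nat.testBit_two_pow_of_ne h, h]

lemma testContrib (u : String) (i : Nat) :
    (pvContribN u).testBit i =
      (PySem.Str.startswith u "commons:featured pictures" &&
        (pvFirst u pvRules == some i)) := by
  unfold pvContribN
  cases hg : PySem.Str.startswith u "commons:featured pictures" with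
  | false => simp only [Bool.false_eq_true, if_false, Bool.false_and, Nat.zero_testBit]
  | true =>
    simp only [if_true, Bool.true_and]
    cases h : pvFirst u pvRules with
    | none => simp
    | some b =>
      show (1 <<< b).testBit i = (some b == some i)
      rw [testBit_one_shift]
      simp

-- split an `any` over an if-then-else predicate (a constant on the matching side)
lemma any_split (rem : List String) (p : String → Bool) (a : Bool) (h : String → Bool) :
    (rem.any (fun u => if p u then a else h u)) =
      ((a && rem.any p) || (rem.filter (fun u => !p u)).any h) := by
  induction rem with
  | nil => simp
  | cons x xs ih =>
    by_cases hp : p x = true <;>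
      simp [hp, ih] <;> cases a <;> cases h x <;> simp

lemma testB (rs : List (String × String)) (k c : Nat) (rem : List String) (i : Nat) :
    (pvFoldBN k c rem rs).testBit i =
      (c.testBit i || rem.any (fun u =>
        match pvFirst u rs with
        | some j => k + j == i
        | none => false)) := by
  induction rs generalizing k c rem with
  | nil => simp [pvFoldBN, pvFirst]
  | cons r rs ih =>
    have hcons : (rem.any (fun u =>
        match pvFirst u (r :: rs) with
        | some j => k + j == i
        | none => false)) =
        (rem.any (fun u => if pvMatches r.1 r.2 u then (k == i)
          else match pvFirst u rs with
               | some j => k + 1 + j == i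
               | none => false)) := by
      congr 1
      funext u
      rw [pvFirst_cons']
      by_cases hm : pvMatches r.1 r.2 u = true
      · simp [hm]
      · simp only [hm, Bool.false_eq_true, if_false]
        cases hf : pvFirst u rs with
        | none => rfl
        | some j =>
          show (k + (j + 1) == i) = (k + 1 + j == i)
          have : k + (j + 1) = k + 1 + j := by omega
          rw [this]
    rw [hcons, any_split rem (fun u => pvMatches r.1 r.2 u) (k == i)]
    unfold pvFoldBN
    by_cases hm : rem.any (fun u => pvMatches r.1 r.2 u) = true
    · rw [if_pos hm, ih, hm]
      simp only [Nat.testBit_or, testBit_one_shift, Bool.and_true, Bool.or_assoc]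
    · rw [if_neg (by simp [hm]), ih]
      have hmf : rem.any (fun u => pvMatches r.1 r.2 u) = false := by
        cases hx : rem.any (fun u => pvMatches r.1 r.2 u) with
        | false => rfl
        | true => exact absurd hx hm
      have hall : ∀ u ∈ rem, pvMatches r.1 r.2 u = false := by
        intro u hu
        cases hcu : pvMatches r.1 r.2 u with
        | false => rfl
        | true => exact absurd (List.any_eq_true.mpr ⟨u, hu, hcu⟩) hm
      rw [hmf, List.filter_eq_self.mpr (fun u hu => by simp [hall u hu])]
      simp only [Bool.and_false, Bool.false_or]

-- B's Int fold equals the Nat shadow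
lemma foldB_eq (rs : List (String × String)) (k c : Nat) (rem : List String) :
    ((PySem.List.enumerate rs (k : Int)).foldl
      (fun (st : Int × List String) p =>
        if st.2.any (fun u => pvMatches p.2.1 p.2.2 u) then
          (PySem.Int.bor st.1 ((1 : Int) <<< p.1.toNat),
           st.2.filter (fun u => !pvMatches p.2.1 p.2.2 u))
        else st)
      (Int.ofNat c, rem)).1 = Int.ofNat (pvFoldBN k c rem rs) := by
  induction rs generalizing k c rem with
  | nil => simp [PySem.List.enumerate_nil, pvFoldBN]
  | cons r rs ih =>
    rw [PySem.List.enumerate_cons, List.foldl_cons]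
    unfold pvFoldBN
    by_cases hm : rem.any (fun u => pvMatches r.1 r.2 u) = true
    · simp only [hm, if_true]
      have h1 : PySem.Int.bor (Int.ofNat c) ((1 : Int) <<< ((((k : Int)).toNat : Nat) : Int)) =
          Int.ofNat (c ||| 1 <<< k) := by
        rw [Int.toNat_natCast, Int.shiftLeft_natCast_right]
        exact bor_shift c k
      have h2 : ((k : Int)) + 1 = ((k + 1 : Nat) : Int) := by push_cast; ring
      rw [h1, h2, ih]
    · simp only [hm, Bool.false_eq_true, if_false]
      have h2 : ((k : Int)) + 1 = ((k + 1 : Nat) : Int) := by push_cast; ring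
      rw [h2, ih]

-- both sides set bit i iff some gated usage's first matching rule is rule i
lemma main_eq (usages : List String) :
    (usages.foldl (fun c u => c ||| pvContribN (PySem.Str.lower u)) 0) =
      pvFoldBN 0 0
        ((usages.map PySem.Str.lower).filter
          (fun u => PySem.Str.startswith u "commons:featured pictures")) pvRules := by
  apply Nat.eq_of_testBit_eq
  intro i
  rw [testA, testB]
  simp only [Nat.zero_testBit, Bool.false_or, List.any_filter, List.any_map]
  congr 1
  funext u
  simp only [Function.comp, testContrib, Nat.zero_add]
  cases hf : pvFirst (PySem.Str.lower u) pvRules with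
  | none => rfl
  | some j => simp

-- ===== VERDICT (by name: the statement is the Claim_ definition above) =====
theorem getcat_spec : Claim_equal_getcat := by
  intro usages _
  unfold Spec_getcat getcat getcat_alt
  show List.foldl getcatStepA (Int.ofNat 0) usages =
    ((PySem.List.enumerate pvRules (((0 : Nat) : Int))).foldl
      (fun (st : Int × List String) p =>
        if st.2.any (fun u => pvMatches p.2.1 p.2.2 u) then
          (PySem.Int.bor st.1 ((1 : Int) <<< p.1.toNat),
           st.2.filter (fun u => !pvMatches p.2.1 p.2.2 u))
        else st)
      (Int.ofNat 0, (usages.map PySem.Str.lower).filter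
          (fun u => PySem.Str.startswith u "commons:featured pictures"))).1
  rw [foldA_eq, foldB_eq, main_eq]
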